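-- pv_equiv track=rewrite | github.com/Ratilife/cheat_sheet5 | callgraph_analyzer.py | render_tree_lines
-- ===== SOURCE A (Python) =====
-- from typing import Dict, List, Optional, Set, Tuple, Iterable
--
-- def render_tree_lines(roots: List[str], edges: Dict[str, Set[str]], max_depth: int = 20) -> List[str]:
--     lines: List[str] = []
--
--     def dfs(node: str, prefix: str, visited: Set[str], depth: int) -> None:
--         if depth > max_depth:
--             lines.append(f"{prefix}… (depth limit)")
--             return
--         children = sorted(list(edges.get(node, set())))
--         for idx, child in enumerate(children):
--             connector = "└─>" if idx == len(children) - 1 else "├─>"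
--             lines.append(f"{prefix}{connector} {child}()")
--             if child in visited:
--                 lines.append(f"{prefix}    ↩ (cycle to {child})")
--                 continue
--             visited.add(child)
--             new_prefix = f"{prefix}    " if idx == len(children) - 1 else f"{prefix}│   "
--             dfs(child, new_prefix, visited, depth + 1)
--             visited.remove(child)
--
--     for root in sorted(roots):
--         lines.append(f"{root}()")
--         dfs(root, "    ", {root}, 1)
--         lines.append("")
--     return lines
-- ===== SOURCE B (Python) =====
-- from typing import Dict, List, Set
--
--
-- def render_tree_lines(roots: List[str], edges: Dict[str, Set[str]], max_depth: int = 20) -> List[str]: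
--     def branch(child: str, conn: str, ind: str, path: frozenset, depth: int) -> List[str]:
--         head = conn + " " + child + "()"
--         if child in path:
--             return [head, "    ↩ (cycle to " + child + ")"]
--         return [head] + [ind + line for line in block(child, path | frozenset({child}), depth)]
--
--     def block(node: str, path: frozenset, depth: int) -> List[str]:
--         if depth > max_depth:
--             return ["… (depth limit)"]
--         children = sorted(edges.get(node, set()))
--         if not children:
--             return []
--         out: List[str] = []
--         for child in children[:-1]:
--             out += branch(child, "├─>", "│   ", path, depth + 1)
--         return out + branch(children[-1], "└─>", "    ", path, depth + 1)
--
--     lines: List[str] = []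
--     for root in sorted(roots):
--         lines.append(root + "()")
--         lines += ["    " + line for line in block(root, frozenset({root}), 1)]
--         lines.append("")
--     return lines
-- ===== Notes on version B (the rewrite author's own statement) =====
-- stated objective: simpler
-- what changed: B replaces A's closure-mutated line list with prefixes threaded down and visited.add/remove bookkeeping by a pure recursion that returns each node's prefix-free block, splits the last child off the sibling loop (no idx==len-1 test), uses immutable path sets, and applies indentation by mapping over child blocks on the way up.
import Mathlib
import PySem

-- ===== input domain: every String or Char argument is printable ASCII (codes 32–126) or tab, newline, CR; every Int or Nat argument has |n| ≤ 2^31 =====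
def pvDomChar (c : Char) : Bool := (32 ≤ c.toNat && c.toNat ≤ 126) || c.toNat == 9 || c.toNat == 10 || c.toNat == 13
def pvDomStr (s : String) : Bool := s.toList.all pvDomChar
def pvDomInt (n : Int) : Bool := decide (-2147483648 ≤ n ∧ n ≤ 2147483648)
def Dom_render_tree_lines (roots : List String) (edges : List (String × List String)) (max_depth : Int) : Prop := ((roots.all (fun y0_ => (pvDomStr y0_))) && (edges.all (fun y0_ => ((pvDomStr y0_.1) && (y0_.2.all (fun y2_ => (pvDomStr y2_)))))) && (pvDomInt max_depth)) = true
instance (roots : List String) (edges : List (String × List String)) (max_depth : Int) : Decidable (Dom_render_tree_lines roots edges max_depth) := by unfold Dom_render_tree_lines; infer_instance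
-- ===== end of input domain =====

-- B renders each node as a prefix-free block (pure recursion on immutable path sets, indentation
-- mapped over child blocks on the way up, last child split off from the loop) instead of A's
-- closure-mutated line list with prefixes threaded down and visited add/remove; objective: simpler.
-- Both ports encode Python's `depth > max_depth` cutoff as the Nat fuel (max_depth - depth + 1).toNat.

-- ===== PORT A =====
-- sorted(list(edges.get(node, set()))) — shared by both ports (both Pythons contain this expression)
def pvChildren (edges : List (String × List String)) (node : String) : List String :=
  PySem.List.sorted (PySem.Set.ofList (PySem.Dict.getD (PySem.Dict.ofList edges) node [])) (fun x => x) false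

mutual
-- dfs(node, prefix, visited, depth); fuel = (max_depth - depth + 1).toNat
def pvDfsA (edges : List (String × List String)) (node pfx : String) (visited : PySem.Set String) (fuel : Nat) : List String :=
  match fuel with
  | 0 => [pfx ++ "… (depth limit)"]
  | Nat.succ f =>
    let children := pvChildren edges node
    pvLoopA edges pfx visited f children.length 0 children
termination_by (fuel, 0)

-- the `for idx, child in enumerate(children)` loop; visited.add(child)/visited.remove(child)
-- around the recursive call cancel (child ∉ visited there), so later iterations reuse `visited`.
def pvLoopA (edges : List (String × List String)) (pfx : String) (visited : PySem.Set String) (f : Nat) (total idx : Nat) (rest : List String) : List String :=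
  match rest with
  | [] => []
  | child :: rest' =>
    let connector := if idx = total - 1 then "└─>" else "├─>"
    let head := pfx ++ connector ++ " " ++ child ++ "()"
    if PySem.Set.contains visited child then
      head :: (pfx ++ "    ↩ (cycle to " ++ child ++ ")") :: pvLoopA edges pfx visited f total (idx + 1) rest'
    else
      let newPrefix := if idx = total - 1 then pfx ++ "    " else pfx ++ "│   "
      head :: (pvDfsA edges child newPrefix (PySem.Set.add visited child) f ++
               pvLoopA edges pfx visited f total (idx + 1) rest')
termination_by (f, rest.length + 1)
end

def render_tree_lines (roots : List String) (edges : List (String × List String)) (max_depth : Int) : List String :=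
  (PySem.List.sorted roots (fun x => x) false).foldl
    (fun lines root =>
      lines ++ (root ++ "()") :: (pvDfsA edges root "    " (PySem.Set.ofList [root]) max_depth.toNat ++ [""]))
    []

-- ===== PORT B =====
mutual
-- branch(child, conn, ind, path, depth): the lines contributed by one child slot
def pvBranchB (edges : List (String × List String)) (path : PySem.Set String) (f : Nat) (child conn ind : String) : List String :=
  let head := conn ++ " " ++ child ++ "()"
  if PySem.Set.contains path child then
    [head, "    ↩ (cycle to " ++ child ++ ")"]
  else
    head :: (pvBlockB edges (PySem.Set.add path child) child f).map (fun l => ind ++ l)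
termination_by (f, 1)

-- block(node, path, depth): node's subtree lines, prefix-free; fuel = (max_depth - depth + 1).toNat
def pvBlockB (edges : List (String × List String)) (path : PySem.Set String) (node : String) (fuel : Nat) : List String :=
  match fuel with
  | 0 => ["… (depth limit)"]
  | Nat.succ f =>
    let children := pvChildren edges node
    match children.getLast? with
    | none => []
    | some last =>
      children.dropLast.foldl (fun out c => out ++ pvBranchB edges path f c "├─>" "│   ") [] ++
        pvBranchB edges path f last "└─>" "    "
termination_by (fuel, 0)
end

def render_tree_lines_alt (roots : List String) (edges : List (String × List String)) (max_depth : Int) : List String :=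
  (PySem.List.sorted roots (fun x => x) false).foldl
    (fun lines root =>
      lines ++ (root ++ "()") ::
        ((pvBlockB edges (PySem.Set.ofList [root]) root max_depth.toNat).map (fun l => "    " ++ l) ++ [""]))
    []

-- ===== PRECONDITION & SPEC =====
def Spec_render_tree_lines (roots : List String) (edges : List (String × List String)) (max_depth : Int) (out : List String) : Prop := out = render_tree_lines_alt roots edges max_depth
instance (roots : List String) (edges : List (String × List String)) (max_depth : Int) (out : List String) : Decidable (Spec_render_tree_lines roots edges max_depth out) := by unfold Spec_render_tree_lines; infer_instance

-- ===== CLAIM (what is proved, stated in full; the proofs are below) =====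
def Claim_equal_render_tree_lines : Prop := ∀ (roots : List String) (edges : List (String × List String)) (max_depth : Int), Dom_render_tree_lines roots edges max_depth → Spec_render_tree_lines roots edges max_depth (render_tree_lines roots edges max_depth)

-- ===== LEMMAS AND PROOFS =====

-- A's loop over a child suffix equals B's dropLast/last split, indented by A's prefix
theorem pvLoop_eq (edges : List (String × List String)) (pfx : String) (visited : PySem.Set String) (f : Nat)
    (ih : ∀ (node pfx' : String) (vis : PySem.Set String),
      pvDfsA edges node pfx' vis f = (pvBlockB edges vis node f).map (fun l => pfx' ++ l)) :
    ∀ (rest : List String) (idx total : Nat), rest ≠ [] → idx + rest.length = total →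
      pvLoopA edges pfx visited f total idx rest =
        (rest.dropLast.flatMap (fun c => pvBranchB edges visited f c "├─>" "│   ") ++
          pvBranchB edges visited f (rest.getLastD "") "└─>" "    ").map (fun l => pfx ++ l) := by
  intro rest
  induction rest with
  | nil => intro idx total hne h; exact absurd rfl hne
  | cons child rest' ihr =>
    intro idx total _ h
    match rest' with
    | [] =>
      have hidx : idx = total - 1 := by simp at h; omega
      by_cases hc : child ∈ visited
      · simp [pvLoopA, pvBranchB, hidx, hc, String.append_assoc]
      · simp [pvLoopA, pvBranchB, hidx, hc, ih, String.append_assoc]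
    | c2 :: rest'' =>
      have hidx : ¬ idx = total - 1 := by simp at h; omega
      have h' : (idx + 1) + (c2 :: rest'').length = total := by simp at h ⊢; omega
      by_cases hc : child ∈ visited
      · simp [pvLoopA, pvBranchB, hidx, hc, ihr _ _ (by simp) h', String.append_assoc]
      · simp [pvLoopA, pvBranchB, hidx, hc, ihr _ _ (by simp) h', ih, String.append_assoc]

-- the central fact: A's prefix-threaded dfs = B's prefix-free block, indented
theorem pvKey (f : Nat) : ∀ (edges : List (String × List String)) (node pfx : String) (visited : PySem.Set String),
    pvDfsA edges node pfx visited f = (pvBlockB edges visited node f).map (fun l => pfx ++ l) := by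
  induction f with
  | zero => intro edges node pfx visited; simp [pvDfsA, pvBlockB]
  | succ f ihf =>
    intro edges node pfx visited
    rw [pvDfsA, pvBlockB]
    match hch : pvChildren edges node with
    | [] => simp [pvLoopA]
    | c :: cs =>
      have hne : c :: cs ≠ [] := by simp
      rw [pvLoop_eq edges pfx visited f (fun node pfx' vis => ihf edges node pfx' vis)
        (c :: cs) 0 (c :: cs).length hne (by simp)]
      rw [List.getLast?_eq_some_getLast hne]
      rw [PySem.List.foldl_append_eq_flatMap]
      simp [List.getLastD_eq_getLast?, List.getLast?_eq_some_getLast hne]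

-- the two top-level folds agree step by step
theorem pvTop (edges : List (String × List String)) (maxd : Int) :
    ∀ (l acc : List String),
      l.foldl (fun lines root =>
        lines ++ (root ++ "()") :: (pvDfsA edges root "    " (PySem.Set.ofList [root]) maxd.toNat ++ [""])) acc =
      l.foldl (fun lines root =>
        lines ++ (root ++ "()") ::
          ((pvBlockB edges (PySem.Set.ofList [root]) root maxd.toNat).map (fun l => "    " ++ l) ++ [""])) acc := by
  intro l
  induction l with
  | nil => intro acc; rfl
  | cons x xs ih => intro acc; simp only [List.foldl_cons, pvKey maxd.toNat edges x "    ", ih]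

-- ===== VERDICT (by name: the statement is the Claim_ definition above) =====
theorem render_tree_lines_spec : Claim_equal_render_tree_lines := by
  intro roots edges max_depth _
  unfold Spec_render_tree_lines render_tree_lines render_tree_lines_alt
  exact pvTop edges max_depth _ []
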